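-- pv_equiv track=rewrite | github.com/ffancer/study_with_codewars_part2 | 7 kyu Barista problem.py | barista
-- ===== SOURCE A (Python) =====
-- def barista(coffees):
--     clean = 2
--     sorted_lst = sorted(coffees)
--     a = sorted_lst[0]
--     total = 0
--
--     for i in sorted_lst[1:]:
--         total += clean + a + i
--         a = i
--
--     return total
-- ===== SOURCE B (Python) =====
-- def barista(coffees):
--     n = len(coffees)
--     return 2 * (n - 1) + 2 * sum(coffees) - min(coffees) - max(coffees)
-- ===== Notes on version B (the rewrite author's own statement) =====
-- stated objective: faster
-- what changed: Replaced sort-then-scan over consecutive pairs by the closed form 2*(n-1) + 2*sum - min - max computed without sorting.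
-- outside the precondition, e.g. on barista([]): A raises IndexError, B raises ValueError
import Mathlib
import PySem

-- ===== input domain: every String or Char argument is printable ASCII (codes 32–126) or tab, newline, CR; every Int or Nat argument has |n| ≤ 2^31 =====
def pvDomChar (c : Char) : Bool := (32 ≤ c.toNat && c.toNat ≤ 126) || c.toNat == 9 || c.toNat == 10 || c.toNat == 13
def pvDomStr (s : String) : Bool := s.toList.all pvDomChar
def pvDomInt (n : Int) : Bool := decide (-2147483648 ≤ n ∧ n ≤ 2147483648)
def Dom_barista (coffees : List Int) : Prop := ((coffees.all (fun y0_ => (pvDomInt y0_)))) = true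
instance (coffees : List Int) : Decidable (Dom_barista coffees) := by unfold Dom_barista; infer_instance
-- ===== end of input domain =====

-- B replaces A's sort-then-scan over consecutive pairs by the closed form
-- 2*(n-1) + 2*sum - min - max, computed without sorting (asymptotically faster).


-- ===== PORT A =====
def barista (coffees : List Int) : Int :=
  let clean : Int := 2
  let sorted_lst := PySem.List.sorted coffees (fun x => x) false
  match PySem.List.pyGet? sorted_lst 0 with   -- sorted_lst[0]: IndexError on [] (excluded by Pre_)
  | none => 0
  | some a =>
    (((PySem.List.slice sorted_lst (some 1) none).foldl
        (fun (p : Int × Int) i => (p.1 + (clean + p.2 + i), i)) ((0 : Int), a))).1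

-- ===== PORT B =====
def barista_alt (coffees : List Int) : Int :=
  let n : Int := coffees.length
  match PySem.List.min? coffees (fun x => x), PySem.List.max? coffees (fun x => x) with
  | some mn, some mx => 2 * (n - 1) + 2 * coffees.sum - mn - mx
  | _, _ => 0   -- min()/max() raise ValueError on [] (excluded by Pre_)

-- ===== PRECONDITION & SPEC =====
-- Pre_ excludes only the empty list, on which A raises IndexError (and B ValueError).
def Pre_barista (coffees : List Int) : Prop := coffees ≠ []
instance (coffees : List Int) : Decidable (Pre_barista coffees) := by unfold Pre_barista; infer_instance
def pvWitness_barista : List Int := [3, 1, 2]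
def Spec_barista (coffees : List Int) (out : Int) : Prop := out = barista_alt coffees
instance (coffees : List Int) (out : Int) : Decidable (Spec_barista coffees out) := by unfold Spec_barista; infer_instance

-- ===== CLAIM (what is proved, stated in full; the proofs are below) =====
def Claim_equal_barista : Prop := ∀ (coffees : List Int), Dom_barista coffees → Pre_barista coffees → Spec_barista coffees (barista coffees)

-- ===== LEMMAS AND PROOFS =====

-- A's loop: running pair total, plus the previous element threaded through.
lemma loop_barista (t : List Int) : ∀ (tot a : Int),
    t.foldl (fun (p : Int × Int) i => (p.1 + (2 + p.2 + i), i)) (tot, a)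
      = (tot + 2 * t.length + a + 2 * t.sum - t.foldl (fun _ i => i) a,
         t.foldl (fun _ i => i) a) := by
  induction t with
  | nil => intro tot a; simp
  | cons i t' ih =>
    intro tot a
    simp only [List.foldl_cons, ih, List.length_cons, List.sum_cons, Prod.mk.injEq]
    refine ⟨by push_cast; ring, by trivial⟩

lemma foldl_snd_last (t : List Int) : ∀ (a : Int),
    t.foldl (fun _ i => i) a = (a :: t).getLast (by simp) := by
  induction t with
  | nil => intro a; rfl
  | cons i t' ih => intro a; simpa using ih i

theorem barista_spec : Claim_equal_barista := by
  intro coffees _ hpre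
  unfold Spec_barista barista barista_alt
  obtain ⟨h, t, hs⟩ : ∃ h t, PySem.List.sorted coffees (fun x => x) false = h :: t := by
    rcases hl : PySem.List.sorted coffees (fun x => x) false with _ | ⟨h, t⟩
    · exact absurd ((PySem.List.sorted_eq_nil_iff coffees (fun x => x) false).mp hl) hpre
    · exact ⟨h, t, rfl⟩
  have hperm : (h :: t).Perm coffees := hs ▸ PySem.List.sorted_perm coffees (fun x => x) false
  have hhead : ∀ y ∈ coffees, h ≤ y := PySem.List.key_head_sorted_le coffees (fun x => x) hs
  set L := t.foldl (fun _ i => i) h with hL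
  have hLlast : L = (h :: t).getLast (by simp) := foldl_snd_last t h
  have hLmem : L ∈ (h :: t) := hLlast ▸ List.getLast_mem _
  have hLmax : ∀ y ∈ (h :: t), y ≤ L := by
    intro y hy
    obtain ⟨p, hplt, hpy⟩ := List.mem_iff_getElem.mp hy
    rw [hLlast, List.getLast_eq_getElem, ← hpy]
    have hq : (h :: t).length - 1 < (PySem.List.sorted coffees (fun x => x)).length := by
      simp [hs]
    have := PySem.List.key_sorted_getElem_mono coffees (fun x => x)
      (p := p) (q := (h :: t).length - 1) (by simp at hplt ⊢; omega) hq
    simpa [hs] using this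
  rcases hmn : PySem.List.min? coffees (fun x => x) with _ | mn
  · exact absurd ((PySem.List.min?_eq_none_iff coffees (fun x => x)).mp hmn) hpre
  rcases hmx : PySem.List.max? coffees (fun x => x) with _ | mx
  · exact absurd ((PySem.List.max?_eq_none_iff coffees (fun x => x)).mp hmx) hpre
  have hmn_mem : mn ∈ coffees := PySem.List.min?_mem hmn
  have hmx_mem : mx ∈ coffees := PySem.List.max?_mem hmx
  have hmn_eq : h = mn :=
    le_antisymm (hhead mn hmn_mem)
      (PySem.List.min?_isMin hmn h (hperm.mem_iff.mp (by simp)))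
  have hmx_eq : L = mx :=
    le_antisymm (PySem.List.max?_isMax hmx L (hperm.mem_iff.mp hLmem))
      (hLmax mx (hperm.mem_iff.mpr hmx_mem))
  have hsum : h + t.sum = coffees.sum := by
    have := hperm.sum_eq; simpa using this
  have hlen : (1 : Int) + t.length = coffees.length := by
    have := hperm.length_eq; simp at this; omega
  simp only [hs]
  have hslice : PySem.List.slice (h :: t) (some 1) none = t := by
    simp [PySem.List.slice, PySem.List.clampIdx]
  rw [hslice]
  simp only [PySem.List.pyGet?]
  norm_num [PySem.List.pyIdx?]
  rw [loop_barista t 0 h, ← hL]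
  rw [hmn_eq, hmx_eq] at *
  omega
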